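-- pv_equiv track=rewrite | github.com/Rositsazz/HackBulgaria-Programming0 | week4/WinterIsComing/winter.py | winter_is_coming
-- ===== SOURCE A (Python) =====
-- def winter_is_coming(seasons):
--     counter = 0
--
--     for index in range(0,len(seasons)):
--
--         season = seasons[index]
--         if season == "winter" :
--             counter = 0
--         else :
--             counter+=1
--     if counter >= 5:
--         return True
--
--     return False
-- ===== SOURCE B (Python) =====
-- def winter_is_coming(seasons):
--     if "winter" in seasons:
--         tail = seasons[::-1].index("winter")
--     else:
--         tail = len(seasons)
--     return tail >= 5
-- ===== Notes on version B (the rewrite author's own statement) =====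
-- stated objective: simpler
-- what changed: Replaces the forward resetting-counter loop with a last-occurrence lookup (index of 'winter' in the reversed list, or len(seasons) if absent) and a single >= 5 comparison on that tail length.
import Mathlib
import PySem

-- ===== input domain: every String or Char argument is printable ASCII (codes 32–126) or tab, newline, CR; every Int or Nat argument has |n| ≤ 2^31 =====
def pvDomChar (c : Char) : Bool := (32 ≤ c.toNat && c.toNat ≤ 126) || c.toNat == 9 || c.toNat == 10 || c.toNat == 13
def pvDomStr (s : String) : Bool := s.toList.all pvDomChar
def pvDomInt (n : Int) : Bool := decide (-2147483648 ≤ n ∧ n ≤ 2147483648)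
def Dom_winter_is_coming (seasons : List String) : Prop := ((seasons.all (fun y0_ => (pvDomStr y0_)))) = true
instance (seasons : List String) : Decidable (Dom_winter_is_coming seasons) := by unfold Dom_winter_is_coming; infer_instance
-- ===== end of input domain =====

-- B finds the last occurrence of "winter" (via the reversed list) and compares the tail length
-- with 5 by arithmetic, replacing A's forward resetting-counter pass; objective: simpler.

-- ===== PORT A =====
-- counter = 0; for index in range(0, len(seasons)): reset on "winter", else +1; return counter >= 5
def winter_is_coming (seasons : List String) : Bool :=
  let counter : Int :=
    (PySem.List.pyRange 0 (seasons.length : Int) 1).foldl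
      (fun counter index =>
        -- seasons[index]: index ∈ range(0, len(seasons)) is always in range, so pyGetD is exact
        if PySem.List.pyGetD seasons index "" == "winter" then 0 else counter + 1)
      0
  if counter ≥ 5 then true else false

-- ===== PORT B =====
-- if "winter" in seasons: tail = seasons[::-1].index("winter") else: tail = len(seasons); return tail >= 5
def winter_is_coming_alt (seasons : List String) : Bool :=
  let tail : Int :=
    if seasons.contains "winter" then
      match (PySem.List.slice? seasons none none (-1)).bind
              (fun r => PySem.List.index? r "winter") with
      | some k => (k : Int)
      | none => 0  -- unreachable: guarded by the membership test
    else (seasons.length : Int)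
  decide ((5 : Int) ≤ tail)

-- ===== PRECONDITION & SPEC =====
def Spec_winter_is_coming (seasons : List String) (out : Bool) : Prop := out = winter_is_coming_alt seasons
instance (seasons : List String) (out : Bool) : Decidable (Spec_winter_is_coming seasons out) := by unfold Spec_winter_is_coming; infer_instance

-- ===== CLAIM (what is proved, stated in full; the proofs are below) =====
def Claim_equal_winter_is_coming : Prop := ∀ (seasons : List String), Dom_winter_is_coming seasons → Spec_winter_is_coming seasons (winter_is_coming seasons)

-- ===== LEMMAS AND PROOFS =====

-- A's loop body, once the index lookup is resolved to the element itself.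
def pvStep (counter : Int) (season : String) : Int :=
  if season == "winter" then 0 else counter + 1

-- A's range-indexed loop is a fold over the list itself.
theorem pvFoldRange (seasons : List String) :
    (PySem.List.pyRange 0 (seasons.length : Int) 1).foldl
      (fun counter index =>
        if PySem.List.pyGetD seasons index "" == "winter" then 0 else counter + 1) 0
    = seasons.foldl pvStep 0 := by
  have h := PySem.List.foldl_pyRange_pyGetD' seasons "" pvStep (0:Int) (a := 0) (le_refl 0)
  simpa [pvStep] using h

-- Characterisation of A's counter after the fold, for any initial value.
theorem pvCounterChar (seasons : List String) (c : Int) :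
    seasons.foldl pvStep c =
      match PySem.List.index? seasons.reverse "winter" with
      | some k => (k : Int)
      | none => c + (seasons.length : Int) := by
  induction seasons using List.reverseRecOn generalizing c with
  | nil => simp [PySem.List.index?]
  | append_singleton xs x ih =>
    rw [List.foldl_append]
    simp only [List.foldl_cons, List.foldl_nil, List.reverse_append, List.reverse_cons,
      List.reverse_nil, List.nil_append, List.cons_append]
    by_cases hx : x = "winter"
    · subst hx
      rw [PySem.List.index?_cons_self]
      simp [pvStep]
    · rw [PySem.List.index?_cons_of_ne xs.reverse hx]
      rw [ih]
      cases h : PySem.List.index? xs.reverse "winter" with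
      | some k => simp [pvStep, hx]
      | none => simp [pvStep, hx]; ring

-- ===== VERDICT (by name: the statement is the Claim_ definition above) =====
theorem winter_is_coming_spec : Claim_equal_winter_is_coming := by
  intro seasons _
  unfold Spec_winter_is_coming winter_is_coming winter_is_coming_alt
  rw [pvFoldRange, pvCounterChar, PySem.List.slice?_none_none_neg_one]
  by_cases hmem : "winter" ∈ seasons
  · obtain ⟨k, hk⟩ : ∃ k, PySem.List.index? seasons.reverse "winter" = some k := by
      have hs := (PySem.List.index?_isSome_iff seasons.reverse "winter").mpr
        (by simpa using hmem)
      exact Option.isSome_iff_exists.mp hs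
    rw [PySem.List.index?_eq_idxOf?] at hk
    simp [hk, hmem, ge_iff_le]
  · have h := (PySem.List.index?_eq_none_iff seasons.reverse "winter").mpr
      (by simpa using hmem)
    rw [PySem.List.index?_eq_idxOf?] at h
    simp [h, hmem, ge_iff_le]
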